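-- pv_equiv track=rewrite | github.com/talvola/generic_poker | tools/generate_rankings/generate_partial_hand_27_ja_ffh_rankings.py | generate_high_card_combos
-- ===== SOURCE A (Python) =====
-- import itertools
--
-- def sort_key_a2(card):
--     ranks = ['A', 'K', 'Q', 'J', '7', '6', '5', '4', '3', '2']
--     suits = ['s', 'h', 'd', 'c']
--
--     rank, suit = card[:-1], card[-1]
--     return ranks.index(rank), suits.index(suit)
--
-- def generate_high_card_combos(num_cards):
--     ranks = ['A', 'K', 'Q', 'J', '7', '6', '5', '4', '3', '2']
--     suits = ['s', 'h', 'd', 'c']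
--
--     # Generate the deck
--     deck = [f"{rank}{suit}" for rank in ranks for suit in suits]
--
--     # Generate all 2-card combinations
--     card_combos = list(itertools.combinations(deck, num_cards))
--
--     # Sort each hand and then the list of hands
--     sorted_combos = [sorted(hand, key=sort_key_a2) for hand in card_combos]
--     sorted_combos.sort(key=lambda hand: [sort_key_a2(card) for card in hand])
--
--     # Convert each tuple to a list (optional)
--     sorted_combos = [list(hand) for hand in sorted_combos]
--
--     return sorted_combos
-- ===== SOURCE B (Python) =====
-- def generate_high_card_combos(num_cards):
--     ranks = ['A', 'K', 'Q', 'J', '7', '6', '5', '4', '3', '2']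
--     suits = ['s', 'h', 'd', 'c']
--     deck = [f"{rank}{suit}" for rank in ranks for suit in suits]
--     if num_cards < 0:
--         raise ValueError("num_cards must be non-negative")
--     result = []
--
--     def backtrack(start, hand):
--         if len(hand) == num_cards:
--             result.append(list(hand))
--             return
--         if num_cards - len(hand) > len(deck) - start:
--             return
--         for i in range(start, len(deck)):
--             hand.append(deck[i])
--             backtrack(i + 1, hand)
--             hand.pop()
--
--     backtrack(0, [])
--     return result
-- ===== Notes on version B (the rewrite author's own statement) =====
-- stated objective: alternative
-- what changed: B replaces itertools.combinations followed by a per-hand sort and a global key-list sort with one recursive backtracking enumerator over ascending deck indices that emits the hands directly in the final sorted order (the deck is already in key order), raising ValueError on negative num_cards just as itertools.combinations does.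
import Mathlib
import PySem

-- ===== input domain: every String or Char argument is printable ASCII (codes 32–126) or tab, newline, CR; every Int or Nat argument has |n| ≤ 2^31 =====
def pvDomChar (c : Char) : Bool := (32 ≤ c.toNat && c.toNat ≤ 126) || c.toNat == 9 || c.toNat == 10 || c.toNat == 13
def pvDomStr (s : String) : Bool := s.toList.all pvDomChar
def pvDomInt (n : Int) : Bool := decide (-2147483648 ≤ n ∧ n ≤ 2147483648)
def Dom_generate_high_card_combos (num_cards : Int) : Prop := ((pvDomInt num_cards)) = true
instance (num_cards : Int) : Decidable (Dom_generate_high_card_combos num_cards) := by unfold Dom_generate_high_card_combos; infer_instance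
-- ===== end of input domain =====

-- B replaces A's itertools.combinations + per-hand sort + global sort by a recursive
-- backtracking enumerator that emits the hands directly in A's final order, with no sorting passes.


-- ===== PORT A =====
def pvRanksA : List String := ["A", "K", "Q", "J", "7", "6", "5", "4", "3", "2"]
def pvSuitsA : List String := ["s", "h", "d", "c"]

-- sort_key_a2(card): card[:-1] and card[-1] (the latter ported as the slice card[-1:], equal on the
-- nonempty 2-char deck cards this is applied to); ranks.index/suits.index via PySem.List.index? —
-- the ValueError branch (.getD 0) is unreachable: every card handed to it comes from the deck.
def sort_key_a2 (card : String) : Int × Int :=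
  let rank := PySem.Str.slice card none (some (-1))
  let suit := PySem.Str.slice card (some (-1)) none
  (((PySem.List.index? pvRanksA rank).getD 0 : Nat), ((PySem.List.index? pvSuitsA suit).getD 0 : Nat))

-- the key list [sort_key_a2(card) for card in hand] of the lambda passed to list.sort
def pvHandKeyA (hand : List String) : List (Int × Int) := hand.map sort_key_a2

-- Python's '<' on (Int × Int) tuples (lexicographic; Mathlib's Prod '<' is pointwise, so spelt out)
def pvTupLt (a b : Int × Int) : Bool := a.1 < b.1 || (a.1 == b.1 && a.2 < b.2)

-- Python's '<' on lists of such tuples (lexicographic), as used by list.sort on the key lists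
def pvKeyLt : List (Int × Int) → List (Int × Int) → Bool
  | _, [] => false
  | [], _ :: _ => true
  | a :: as, b :: bs => if pvTupLt a b then true else if pvTupLt b a then false else pvKeyLt as bs

def generate_high_card_combos (num_cards : Int) : List (List String) :=
  let ranks := pvRanksA
  let suits := pvSuitsA
  -- deck = [f"{rank}{suit}" …] (f-string concatenation via PySem.Str.join)
  let deck := ranks.flatMap (fun rank => suits.map (fun suit => PySem.Str.join "" [rank, suit]))
  -- itertools.combinations(deck, num_cards); num_cards ≥ 0 by Pre_ (a negative r raises
  -- ValueError); CPython's combinations first returns immediately when r > len(pool), kept here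
  let card_combos := if num_cards.toNat > deck.length then []
    else PySem.List.combinations deck num_cards.toNat
  -- [sorted(hand, key=sort_key_a2) for hand in card_combos]  (tuple key → sorted2)
  let sorted_combos := card_combos.map (fun hand =>
    PySem.List.sorted2 hand (fun c => (sort_key_a2 c).1) (fun c => (sort_key_a2 c).2))
  -- sorted_combos.sort(key=lambda hand: [sort_key_a2(card) for card in hand]): list.sort with a
  -- List (Int × Int) key is PySem's stable insertion sort with Python's lexicographic key
  -- comparison, hand-spelt (pvKeyLt) because Mathlib's '<' on pairs is pointwise (exact there)
  -- CPython's list.sort(key=f) computes f once per element (decorate), then sorts by the stored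
  -- keys with the stable insertion sort PySem models, then strips the keys
  let keyed := sorted_combos.map (fun hand => (pvHandKeyA hand, hand))
  let keyed_sorted := keyed.foldl
    (fun acc p => PySem.List.insertBy (fun p1 p2 => pvKeyLt p1.1 p2.1) p acc) []
  let sorted_combos := keyed_sorted.map (fun p => p.2)
  -- [list(hand) for hand in sorted_combos] is the identity here (the hands are already lists)
  sorted_combos

-- ===== PORT B =====
def pvRanksB : List String := ["A", "K", "Q", "J", "7", "6", "5", "4", "3", "2"]
def pvSuitsB : List String := ["s", "h", "d", "c"]
def pvDeckB : List String :=
  pvRanksB.flatMap (fun rank => pvSuitsB.map (fun suit => PySem.Str.join "" [rank, suit]))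

-- backtrack(start, hand): the 'for i in range(start, len(deck))' loop is ported as recursion that
-- peels off i = start (extend the hand with deck[start]) and then runs the rest of the loop
-- (same hand, start+1); deck[i] via getD (i < len(deck) inside the loop, so never the default).
def pvBacktrack (deck : List String) (num_cards : Int) (start : Nat) (hand : List String) :
    List (List String) :=
  if (hand.length : Int) = num_cards then [hand]
  else if num_cards - hand.length > (deck.length : Int) - start then []
  else if _h : start < deck.length then
    pvBacktrack deck num_cards (start + 1) (hand ++ [deck.getD start ""]) ++
      pvBacktrack deck num_cards (start + 1) hand
  else []
termination_by deck.length - start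
decreasing_by all_goals omega

def generate_high_card_combos_alt (num_cards : Int) : List (List String) :=
  -- 'if num_cards < 0: raise ValueError' — excluded by Pre_; the port returns [] on that branch
  if num_cards < 0 then []
  else pvBacktrack pvDeckB num_cards 0 []

-- ===== PRECONDITION & SPEC =====
-- Pre_ excludes exactly the negative num_cards, where A raises ValueError (from itertools.combinations).
def Pre_generate_high_card_combos (num_cards : Int) : Prop := 0 ≤ num_cards
instance (num_cards : Int) : Decidable (Pre_generate_high_card_combos num_cards) := by
  unfold Pre_generate_high_card_combos; infer_instance

def pvWitness_generate_high_card_combos : Int := (2)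

def Spec_generate_high_card_combos (num_cards : Int) (out : List (List String)) : Prop := out = generate_high_card_combos_alt num_cards
instance (num_cards : Int) (out : List (List String)) : Decidable (Spec_generate_high_card_combos num_cards out) := by unfold Spec_generate_high_card_combos; infer_instance

-- ===== CLAIM (what is proved, stated in full; the proofs are below) =====
def Claim_equal_generate_high_card_combos : Prop := ∀ (num_cards : Int), Dom_generate_high_card_combos num_cards → Pre_generate_high_card_combos num_cards → Spec_generate_high_card_combos num_cards (generate_high_card_combos num_cards)

-- ===== LEMMAS AND PROOFS =====

-- tuple-order facts
theorem pvTupLt_irrefl (p : Int × Int) : pvTupLt p p = false := by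
  simp [pvTupLt]

theorem pvTupLt_asymm {p q : Int × Int} (h : pvTupLt p q = true) : pvTupLt q p = false := by
  simp only [pvTupLt, Bool.or_eq_true, Bool.and_eq_true, decide_eq_true_eq, beq_iff_eq] at h
  simp only [pvTupLt, Bool.or_eq_false_iff, Bool.and_eq_false_iff, decide_eq_false_iff_not,
    beq_eq_false_iff_ne, ne_eq]
  omega

-- if key a < key b (tuple order) then the inner sort's comparison never puts b before a
theorem pvTupLt_to_revLt_false {p q : String} (h : pvTupLt (sort_key_a2 p) (sort_key_a2 q) = true) :
    (decide ((sort_key_a2 q).1 < (sort_key_a2 p).1) ||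
      (!decide ((sort_key_a2 p).1 < (sort_key_a2 q).1) && decide ((sort_key_a2 q).2 < (sort_key_a2 p).2))) = false := by
  simp only [pvTupLt, Bool.or_eq_true, Bool.and_eq_true, decide_eq_true_eq, beq_iff_eq] at h
  simp only [Bool.or_eq_false_iff, Bool.and_eq_false_iff, decide_eq_false_iff_not,
    Bool.not_eq_eq_eq_not, Bool.not_false, decide_eq_true_eq]
  omega

theorem pvKeyLt_asymm : ∀ {u v : List (Int × Int)}, pvKeyLt u v = true → pvKeyLt v u = false
  | _, [], h => by simp [pvKeyLt] at h
  | [], _ :: _, _ => by simp [pvKeyLt]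
  | a :: as, b :: bs, h => by
    by_cases hab : pvTupLt a b = true
    · simp [pvKeyLt, pvTupLt_asymm hab, hab]
    · by_cases hba : pvTupLt b a = true
      · simp [pvKeyLt, hab, hba] at h
      · have := pvKeyLt_asymm (u := as) (v := bs)
        simp_all [pvKeyLt]

-- a fold of stable insertions over an already strictly increasing list appends each element at the end
theorem pvFoldl_insertBy_eq_append {α : Type} (before : α → α → Bool) :
    ∀ (l acc : List α), (∀ x ∈ l, ∀ y ∈ acc, before x y = false) →
      l.Pairwise (fun a b => before b a = false) →
      l.foldl (fun acc x => PySem.List.insertBy before x acc) acc = acc ++ l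
  | [], acc, _, _ => by simp
  | x :: l, acc, hcross, hpw => by
    have hx : PySem.List.insertBy before x acc = acc ++ [x] :=
      PySem.List.insertBy_of_forall_not_before _ _ _ (fun y hy => hcross x (by simp) y hy)
    have hpw' := (List.pairwise_cons.mp hpw)
    have := pvFoldl_insertBy_eq_append before l (acc ++ [x])
      (fun z hz y hy => by
        rcases List.mem_append.mp hy with hy | hy
        · exact hcross z (by simp [hz]) y hy
        · simp only [List.mem_singleton] at hy; subst hy; exact hpw'.1 z hz)
      hpw'.2
    simp [List.foldl_cons, hx, this]

-- the deck's keys are strictly increasing in deck order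
theorem pvDeckA_pairwise :
    (pvRanksA.flatMap (fun rank => pvSuitsA.map (fun suit => PySem.Str.join "" [rank, suit]))).Pairwise
      (fun a b => pvTupLt (sort_key_a2 a) (sort_key_a2 b) = true) := by
  decide

theorem pvDeckB_eq_deckA :
    pvDeckB = pvRanksA.flatMap (fun rank => pvSuitsA.map (fun suit => PySem.Str.join "" [rank, suit])) := rfl

-- each hand produced by combinations is a strictly key-increasing sublist of the deck
theorem pvHand_pairwise {deck : List String} (hdeck : deck.Pairwise
      (fun a b => pvTupLt (sort_key_a2 a) (sort_key_a2 b) = true))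
    {r : Nat} {hand : List String} (hmem : hand ∈ PySem.List.combinations deck r) :
    hand.Pairwise (fun a b => pvTupLt (sort_key_a2 a) (sort_key_a2 b) = true) :=
  List.Pairwise.sublist ((PySem.List.mem_combinations_iff deck r hand).mp hmem).1 hdeck

-- the inner sorted(hand, key=sort_key_a2) is the identity on such hands
theorem pvInnerSort_eq_self {hand : List String}
    (hpw : hand.Pairwise (fun a b => pvTupLt (sort_key_a2 a) (sort_key_a2 b) = true)) :
    PySem.List.sorted2 hand (fun c => (sort_key_a2 c).1) (fun c => (sort_key_a2 c).2) = hand := by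
  have h := pvFoldl_insertBy_eq_append
      (fun a b => (decide ((sort_key_a2 a).1 < (sort_key_a2 b).1) ||
        (!decide ((sort_key_a2 b).1 < (sort_key_a2 a).1) && decide ((sort_key_a2 a).2 < (sort_key_a2 b).2))))
      hand [] (by simp)
      (hpw.imp (fun {a b} hab => pvTupLt_to_revLt_false hab))
  simpa using h

-- combinations come out pairwise strictly increasing under the key-list order
theorem pvCombos_pairwise :
    ∀ (xs : List String), xs.Pairwise (fun a b => pvTupLt (sort_key_a2 a) (sort_key_a2 b) = true) →
      ∀ (r : Nat), (PySem.List.combinations xs r).Pairwise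
        (fun h1 h2 => pvKeyLt (pvHandKeyA h1) (pvHandKeyA h2) = true) := by
  intro xs
  induction xs with
  | nil =>
    intro _ r
    cases r with
    | zero => simp [PySem.List.combinations_zero]
    | succ r => simp [PySem.List.combinations_nil_succ]
  | cons x xs ih =>
    intro hxs r
    cases r with
    | zero => simp [PySem.List.combinations_zero]
    | succ r =>
      have hx : ∀ y ∈ xs, pvTupLt (sort_key_a2 x) (sort_key_a2 y) = true :=
        (List.pairwise_cons.mp hxs).1
      have hxs' := (List.pairwise_cons.mp hxs).2
      rw [PySem.List.combinations_cons_succ]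
      apply List.pairwise_append.mpr
      refine ⟨?_, ih hxs' (r + 1), ?_⟩
      · -- within the (x :: ·) block the shared head cancels and the tails decide
        apply List.pairwise_map.mpr
        exact (ih hxs' r).imp (fun {u v} huv => by
          simpa [pvHandKeyA, pvKeyLt, pvTupLt_irrefl] using huv)
      · -- a hand starting with x precedes every hand drawn from the tail
        intro a ha b hb
        obtain ⟨u, hu, rfl⟩ := List.mem_map.mp ha
        obtain ⟨hbs, hbl⟩ := (PySem.List.mem_combinations_iff xs (r + 1) b).mp hb
        cases b with
        | nil => simp at hbl
        | cons y v =>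
          have hy : y ∈ xs := hbs.subset (by simp)
          simp [pvHandKeyA, pvKeyLt, hx y hy]

-- the backtracking enumerator IS combinations of the remaining deck, prefixed by the hand in play
theorem pvBacktrack_eq (deck : List String) (n : Int) :
    ∀ (fuel start : Nat) (hand : List String), deck.length - start ≤ fuel →
      (hand.length : Int) ≤ n →
      pvBacktrack deck n start hand =
        (PySem.List.combinations (deck.drop start) (n - hand.length).toNat).map (hand ++ ·) := by
  intro fuel
  induction fuel with
  | zero =>
    intro start hand hfuel hle
    rw [pvBacktrack]
    have hstart : deck.length ≤ start := by omega
    rw [List.drop_eq_nil_of_le hstart]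
    by_cases heq : (hand.length : Int) = n
    · simp [heq, PySem.List.combinations_zero]
    · have hlt : (hand.length : Int) < n := by omega
      have hprune : n - hand.length > (deck.length : Int) - start := by omega
      obtain ⟨k, hk⟩ : ∃ k, (n - hand.length).toNat = k + 1 := ⟨(n - hand.length).toNat - 1, by omega⟩
      simp [heq, hprune, hk, PySem.List.combinations_nil_succ]
  | succ fuel ih =>
    intro start hand hfuel hle
    rw [pvBacktrack]
    by_cases heq : (hand.length : Int) = n
    · simp [heq, PySem.List.combinations_zero]
    · have hlt : (hand.length : Int) < n := by omega
      simp only [heq, if_false]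
      by_cases hprune : n - hand.length > (deck.length : Int) - start
      · have hsz : (deck.drop start).length < (n - hand.length).toNat := by
          simp [List.length_drop]; omega
        rw [if_pos hprune, PySem.List.combinations_eq_nil_of_length_lt _ hsz, List.map_nil]
      · simp only [hprune, if_false]
        have hstart : start < deck.length := by omega
        simp only [dif_pos hstart]
        have hdrop : deck.drop start = deck[start] :: deck.drop (start + 1) :=
          List.drop_eq_getElem_cons hstart
        have hget : deck.getD start "" = deck[start] := List.getD_eq_getElem _ _ hstart
        obtain ⟨k, hk⟩ : ∃ k, (n - hand.length).toNat = k + 1 := ⟨(n - hand.length).toNat - 1, by omega⟩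
        have hk' : (n - ((hand ++ [deck[start]]).length : Int)).toNat = k := by
          simp [List.length_append]; omega
        have h1 := ih (start + 1) (hand ++ [deck[start]]) (by omega) (by simp; omega)
        have h2 := ih (start + 1) hand (by omega) hle
        rw [hget, h1, h2, hdrop, hk, hk', PySem.List.combinations_cons_succ]
        simp [List.map_map, Function.comp_def]

-- ===== VERDICT (by name: the statement is the Claim_ definition above) =====
theorem generate_high_card_combos_spec : Claim_equal_generate_high_card_combos := by
  intro n _ hpre
  have hpre' : 0 ≤ n := hpre
  unfold Spec_generate_high_card_combos
  set deckA := pvRanksA.flatMap (fun rank => pvSuitsA.map (fun suit => PySem.Str.join "" [rank, suit])) with hdeckA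
  -- B's side: the backtracker enumerates exactly the combinations
  have hB : generate_high_card_combos_alt n = PySem.List.combinations deckA n.toNat := by
    unfold generate_high_card_combos_alt
    rw [if_neg (by omega), pvDeckB_eq_deckA, ← hdeckA,
      pvBacktrack_eq deckA n (deckA.length) 0 [] (by omega) (by simp; omega)]
    simp
  -- A's side: both sorting passes are the identity
  have hcombo := pvCombos_pairwise deckA pvDeckA_pairwise n.toNat
  have hA : generate_high_card_combos n = PySem.List.combinations deckA n.toNat := by
    unfold generate_high_card_combos
    dsimp only
    rw [← hdeckA]
    have hguard : (if n.toNat > deckA.length then ([] : List (List String))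
        else PySem.List.combinations deckA n.toNat) = PySem.List.combinations deckA n.toNat := by
      split_ifs with h
      · exact (PySem.List.combinations_eq_nil_of_length_lt _ h).symm
      · rfl
    rw [hguard]
    have hmap : (PySem.List.combinations deckA n.toNat).map (fun hand =>
        PySem.List.sorted2 hand (fun c => (sort_key_a2 c).1) (fun c => (sort_key_a2 c).2)) =
        PySem.List.combinations deckA n.toNat := by
      rw [List.map_congr_left (g := fun h => h) (fun hand hmem =>
        pvInnerSort_eq_self (pvHand_pairwise pvDeckA_pairwise hmem))]
      exact List.map_id' _
    have hsorted := pvFoldl_insertBy_eq_append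
      (fun (p1 p2 : List (Int × Int) × List String) => pvKeyLt p1.1 p2.1)
      ((PySem.List.combinations deckA n.toNat).map (fun hand => (pvHandKeyA hand, hand))) []
      (by simp)
      (List.pairwise_map.mpr (hcombo.imp (fun {a b} hab => pvKeyLt_asymm hab)))
    rw [hmap, hsorted]
    simp [List.map_map, Function.comp_def]
  rw [hA, hB]
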